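-- pv_equiv track=rewrite | github.com/visionautomation2025/Atlas-Nutrunner | Dtat_nse_program/real iv nse.py | get_relevant_strikes
-- ===== SOURCE A (Python) =====
-- def get_relevant_strikes(atm_strike):
--     strike_step = 50
--     strikes = []
--     for i in range(4):
--         strikes.append(atm_strike - (i * strike_step))
--     for i in range(1, 5):
--         strikes.append(atm_strike + (i * strike_step))
--     return sorted(strikes)
-- ===== SOURCE B (Python) =====
-- def get_relevant_strikes(atm_strike):
--     return [atm_strike + i * 50 for i in range(-3, 5)]
-- ===== Notes on version B (the rewrite author's own statement) =====
-- stated objective: simpler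
-- what changed: B generates the strikes directly in ascending order as one arithmetic sequence (one comprehension over range(-3,5)), eliminating A's two separate build loops and the sorted() call.
import Mathlib
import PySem

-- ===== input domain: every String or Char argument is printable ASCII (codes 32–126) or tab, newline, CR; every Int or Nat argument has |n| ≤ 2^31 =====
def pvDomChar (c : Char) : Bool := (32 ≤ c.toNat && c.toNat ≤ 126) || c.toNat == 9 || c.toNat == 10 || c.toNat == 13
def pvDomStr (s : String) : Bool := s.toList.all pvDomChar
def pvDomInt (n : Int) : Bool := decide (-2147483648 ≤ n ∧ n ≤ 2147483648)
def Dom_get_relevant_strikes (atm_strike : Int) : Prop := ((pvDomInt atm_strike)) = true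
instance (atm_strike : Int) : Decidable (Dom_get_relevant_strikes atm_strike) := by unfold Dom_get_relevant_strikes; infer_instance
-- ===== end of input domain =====

-- B generates the strikes directly in ascending order, so A's sorted() call and its two build loops disappear.

-- ===== PORT A =====
def get_relevant_strikes (atm_strike : Int) : List Int :=
  let strike_step : Int := 50
  let strikes : List Int := []
  let strikes := (PySem.List.pyRange 0 4 1).foldl
    (fun s i => s ++ [atm_strike - (i * strike_step)]) strikes
  let strikes := (PySem.List.pyRange 1 5 1).foldl
    (fun s i => s ++ [atm_strike + (i * strike_step)]) strikes
  PySem.List.sorted strikes (fun x => x) false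

-- ===== PORT B =====
def get_relevant_strikes_alt (atm_strike : Int) : List Int :=
  (PySem.List.pyRange (-3) 5 1).map (fun i => atm_strike + i * 50)

-- ===== PRECONDITION & SPEC =====
def Spec_get_relevant_strikes (atm_strike : Int) (out : List Int) : Prop := out = get_relevant_strikes_alt atm_strike
instance (atm_strike : Int) (out : List Int) : Decidable (Spec_get_relevant_strikes atm_strike out) := by unfold Spec_get_relevant_strikes; infer_instance

-- ===== CLAIM (what is proved, stated in full; the proofs are below) =====
def Claim_equal_get_relevant_strikes : Prop := ∀ (atm_strike : Int), Dom_get_relevant_strikes atm_strike → Spec_get_relevant_strikes atm_strike (get_relevant_strikes atm_strike)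

-- ===== LEMMAS AND PROOFS =====

theorem get_relevant_strikes_eq (a : Int) :
    get_relevant_strikes a = get_relevant_strikes_alt a := by
  have hb : get_relevant_strikes_alt a
      = [a - 150, a - 100, a - 50, a] ++ [a + 50, a + 100, a + 150, a + 200] := by
    simp [get_relevant_strikes_alt, PySem.List.pyRange, List.range_succ]
    omega
  have hx : get_relevant_strikes a
      = PySem.List.sorted ([a, a - 50, a - 100, a - 150] ++ [a + 50, a + 100, a + 150, a + 200]) (fun x => x) false := by
    simp [get_relevant_strikes, PySem.List.pyRange, List.range_succ]
  rw [hx, hb]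
  apply PySem.List.sorted_eq_of_perm_of_pairwise_lt
  · exact (List.reverse_perm [a, a - 50, a - 100, a - 150]).append_right _
  · simp [List.pairwise_cons]
    omega

-- ===== VERDICT (by name: the statement is the Claim_ definition above) =====
theorem get_relevant_strikes_spec : Claim_equal_get_relevant_strikes := by
  intro a _
  exact get_relevant_strikes_eq a
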